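-- pv_equiv track=rewrite | github.com/jeffrey9977/Chinese-Discourse-Parser-ACL2020 | preprocessor.py | genBinaryAction
-- ===== SOURCE A (Python) =====
-- def genBinaryAction(p, sList):
--     # ex: 1|2|3   --> 1|2 , 12|3
--     #     1|2|3|4 --> 1|2 , 12|3 , 123|4
--     data = sList.copy()
--
--     for sent in data:
--         if len(sent.split("|")) >= 3:
--             nodes = sent.split("|")
--             for idx in range(0,len(nodes)-1):
--                 data.insert(data.index(sent)+1+idx,nodes[0]+"|"+nodes[1])
--                 new_node = nodes[0]+nodes[1]
--                 nodes.remove(nodes[1])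
--                 # if idx == 0:
--                 nodes.remove(nodes[0])
--                 nodes.insert(0,new_node)
--
--             data.remove(sent)
--
--     binSList = data.copy()
--     return binSList
-- ===== SOURCE B (Python) =====
-- def genBinaryAction(p, sList):
--     out = []
--     for sent in sList:
--         parts = sent.split("|")
--         if len(parts) < 3:
--             out.append(sent)
--         else:
--             prefix = parts[0]
--             for part in parts[1:]:
--                 out.append(prefix + "|" + part)
--                 prefix += part
--     return out
-- ===== Notes on version B (the rewrite author's own statement) =====
-- stated objective: simpler
-- what changed: A rewrites the list in place while iterating over it, using data.index/insert/remove bookkeeping; B is a plain single pass that appends each sentence (or its left-branching binary action chain, built with a running prefix) to a fresh output list.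
import Mathlib
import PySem

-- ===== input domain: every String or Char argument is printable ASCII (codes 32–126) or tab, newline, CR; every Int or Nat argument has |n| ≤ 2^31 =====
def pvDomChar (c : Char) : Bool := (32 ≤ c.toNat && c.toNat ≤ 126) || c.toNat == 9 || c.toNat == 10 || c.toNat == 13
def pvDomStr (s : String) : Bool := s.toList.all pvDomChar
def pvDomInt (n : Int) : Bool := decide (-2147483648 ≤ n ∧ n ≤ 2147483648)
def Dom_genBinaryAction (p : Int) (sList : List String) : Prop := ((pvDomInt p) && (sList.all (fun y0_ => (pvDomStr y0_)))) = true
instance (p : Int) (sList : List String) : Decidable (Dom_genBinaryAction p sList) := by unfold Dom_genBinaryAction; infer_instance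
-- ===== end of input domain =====

-- B replaces A's in-place index/insert/remove rewriting of the list it iterates over by a
-- single pass appending each sentence's left-branching binary actions to a fresh output list.

-- ===== PORT A =====

-- sent.split("|") (the separator is the literal nonempty "|", so Python cannot raise here)
def pySplit (s : String) : List String :=
  (PySem.Chars.splitOn s.toList ['|']).map String.ofList

-- one step of A's inner loop, fully characterised
def aInner (sent : String) (st : List String × List String) (idx : Int) :
    List String × List String :=
  let data := st.1
  let nodes := st.2
  let n0 := (PySem.List.pyGet? nodes 0).getD ""
  let n1 := (PySem.List.pyGet? nodes 1).getD ""
  let i : Nat := (PySem.List.index? data sent).getD 0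
  let data := PySem.List.insert data ((i : Int) + 1 + idx) (n0 ++ "|" ++ n1)
  let new_node := n0 ++ n1
  let nodes := (PySem.List.remove? nodes n1).getD nodes
  let n0' := (PySem.List.pyGet? nodes 0).getD ""
  let nodes := (PySem.List.remove? nodes n0').getD nodes
  let nodes := PySem.List.insert nodes 0 new_node
  (data, nodes)

def aLoop (fuel : Nat) (data : List String) (i : Nat) : List String :=
  match fuel with
  | 0 => data
  | fuel + 1 =>
    if h : i < data.length then
      let sent := data[i]
      if 3 ≤ (pySplit sent).length then
        let nodes := pySplit sent
        let st := (PySem.List.pyRange 0 ((nodes.length : Int) - 1) 1).foldl (aInner sent) (data, nodes)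
        let data' := (PySem.List.remove? st.1 sent).getD st.1
        aLoop fuel data' (i + 1)
      else aLoop fuel data (i + 1)
    else data

def genBinaryAction (p : Int) (sList : List String) : List String :=
  aLoop ((sList.map (fun s => s.toList.length + 1)).sum) sList 0

-- ===== PORT B =====

-- Source B: one pass appending to out; per qualifying sentence a running prefix.
def genBinaryAction_alt (p : Int) (sList : List String) : List String :=
  sList.foldl
    (fun out sent =>
      let parts := pySplit sent
      if parts.length < 3 then out ++ [sent]
      else
        ((PySem.List.slice parts (some 1)).foldl
          (fun (st : List String × String) part =>
            (st.1 ++ [st.2 ++ "|" ++ part], st.2 ++ part))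
          (out, parts.headD "")).1)
    []

-- ===== PRECONDITION & SPEC =====
def Spec_genBinaryAction (p : Int) (sList : List String) (out : List String) : Prop := out = genBinaryAction_alt p sList
instance (p : Int) (sList : List String) (out : List String) : Decidable (Spec_genBinaryAction p sList out) := by unfold Spec_genBinaryAction; infer_instance

-- ===== CLAIM (what is proved, stated in full; the proofs are below) =====
def Claim_equal_genBinaryAction : Prop := ∀ (p : Int) (sList : List String), Dom_genBinaryAction p sList → Spec_genBinaryAction p sList (genBinaryAction p sList)

-- ===== LEMMAS AND PROOFS =====

def sbAux : List Char → List Char × List (List Char)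
  | [] => ([], [])
  | c :: r =>
    let p := sbAux r
    if c = '|' then ([], p.1 :: p.2) else (c :: p.1, p.2)

theorem splitOn_go_eq (fuel : Nat) (l cur : List Char) (acc : List (List Char))
    (h : l.length < fuel) :
    PySem.Chars.splitOn.go ['|'] fuel l cur acc
      = acc.reverse ++ (cur.reverse ++ (sbAux l).1) :: (sbAux l).2 := by
  induction fuel generalizing l cur acc with
  | zero => omega
  | succ fuel ih =>
    cases l with
    | nil => simp [PySem.Chars.splitOn.go, sbAux]
    | cons c rest =>
      by_cases hc : c = '|'
      · subst hc
        rw [show PySem.Chars.splitOn.go ['|'] (fuel+1) ('|'::rest) cur acc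
            = PySem.Chars.splitOn.go ['|'] fuel rest [] (cur.reverse :: acc) from by
          simp [PySem.Chars.splitOn.go, List.isPrefixOf]]
        rw [ih rest [] (cur.reverse :: acc) (by simp at h ⊢; omega)]
        simp [sbAux]
      · rw [show PySem.Chars.splitOn.go ['|'] (fuel+1) (c::rest) cur acc
            = PySem.Chars.splitOn.go ['|'] fuel rest (c :: cur) acc from by
          simp [PySem.Chars.splitOn.go, List.isPrefixOf, Ne.symm hc]]
        rw [ih rest (c :: cur) acc (by simp at h ⊢; omega)]
        simp [sbAux, hc]

theorem pySplit_eq (s : String) :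
    pySplit s = ((sbAux s.toList).1 :: (sbAux s.toList).2).map String.ofList := by
  unfold pySplit PySem.Chars.splitOn
  rw [splitOn_go_eq _ _ _ _ (by omega)]
  simp
def barFree (s : String) : Prop := '|' ∉ s.toList

theorem sbAux_barFree (l : List Char) :
    '|' ∉ (sbAux l).1 ∧ ∀ p ∈ (sbAux l).2, '|' ∉ p := by
  induction l with
  | nil => simp [sbAux]
  | cons c r ih =>
    by_cases hc : c = '|' <;> simp [sbAux, hc]
    · exact ⟨ih.1, ih.2⟩
    · exact ⟨⟨fun h => hc h.symm, ih.1⟩, ih.2⟩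

theorem sbAux_of_barFree (l : List Char) (h : '|' ∉ l) : sbAux l = (l, []) := by
  induction l with
  | nil => simp [sbAux]
  | cons c r ih =>
    simp at h
    have hc : ¬ (c = '|') := fun hh => h.1 hh.symm
    simp [sbAux, hc, ih h.2]

theorem sbAux_append (a b : List Char) (h : '|' ∉ a) :
    sbAux (a ++ '|' :: b) = (a, (sbAux b).1 :: (sbAux b).2) := by
  induction a with
  | nil => simp [sbAux]
  | cons c r ih =>
    simp at h
    have hc : ¬ (c = '|') := fun hh => h.1 hh.symm
    simp [sbAux, hc, ih h.2]

theorem pySplit_ne_nil (s : String) : pySplit s ≠ [] := by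
  rw [pySplit_eq]; simp

theorem pySplit_mem_barFree (s : String) : ∀ x ∈ pySplit s, barFree x := by
  rw [pySplit_eq]
  intro x hx
  simp at hx
  rcases hx with h | ⟨p, hp, rfl⟩
  · subst h; simpa [barFree] using (sbAux_barFree s.toList).1
  · simpa [barFree] using (sbAux_barFree s.toList).2 p hp

theorem pySplit_binary (u v : String) (hu : barFree u) (hv : barFree v) :
    pySplit (u ++ "|" ++ v) = [u, v] := by
  rw [pySplit_eq]
  have : (u ++ "|" ++ v).toList = u.toList ++ '|' :: v.toList := by simp
  rw [this, sbAux_append _ _ hu, sbAux_of_barFree _ hv]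
  simp

theorem sbAux_snd_length (l : List Char) : (sbAux l).2.length ≤ l.length := by
  induction l with
  | nil => simp [sbAux]
  | cons c r ih => by_cases hc : c = '|' <;> simp [sbAux, hc] <;> omega
def chain (pre : String) : List String → List String
  | [] => []
  | p :: ps => (pre ++ "|" ++ p) :: chain (pre ++ p) ps

def expand (s : String) : List String :=
  match pySplit s with
  | [] => [s]
  | p0 :: rest => if rest.length + 1 < 3 then [s] else chain p0 rest

theorem chain_length (pre : String) (ps : List String) : (chain pre ps).length = ps.length := by
  induction ps generalizing pre with
  | nil => rfl
  | cons p ps ih => simp [chain, ih]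

theorem barFree_append (u v : String) (hu : barFree u) (hv : barFree v) :
    barFree (u ++ v) := by
  simp [barFree] at *
  exact ⟨hu, hv⟩

theorem chain_mem_parts (pre : String) (ps : List String) (hpre : barFree pre)
    (hps : ∀ p ∈ ps, barFree p) :
    ∀ e ∈ chain pre ps, (pySplit e).length = 2 := by
  induction ps generalizing pre with
  | nil => simp [chain]
  | cons p ps ih =>
    intro e he
    simp [chain] at he
    rcases he with rfl | he
    · rw [pySplit_binary pre p hpre (hps p (by simp))]
      rfl
    · exact ih (pre ++ p) (barFree_append _ _ hpre (hps p (by simp)))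
        (fun q hq => hps q (by simp [hq])) e he

theorem expand_eq {s p0 : String} {rest : List String} (h : pySplit s = p0 :: rest) :
    expand s = if rest.length + 1 < 3 then [s] else chain p0 rest := by
  unfold expand
  rw [h]

theorem expand_ne_nil (s : String) : expand s ≠ [] := by
  rcases h : pySplit s with _ | ⟨p0, rest⟩
  · exact absurd h (pySplit_ne_nil s)
  · rw [expand_eq h]
    split_ifs with h3
    · simp
    · rcases rest with _ | ⟨r, rest⟩
      · simp at h3
      · simp [chain]

theorem expand_length_le (s : String) : (expand s).length ≤ s.toList.length + 1 := by
  rcases h : pySplit s with _ | ⟨p0, rest⟩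
  · exact absurd h (pySplit_ne_nil s)
  · rw [expand_eq h]
    split_ifs with h3
    · simp
    · rw [chain_length]
      have h1 : rest.length = (sbAux s.toList).2.length := by
        have hh := pySplit_eq s
        rw [h] at hh
        have := congrArg List.length hh
        simpa using this
      have := sbAux_snd_length s.toList
      omega

theorem expand_of_small (s : String) (h : (pySplit s).length < 3) : expand s = [s] := by
  rcases hs : pySplit s with _ | ⟨p0, rest⟩
  · exact absurd hs (pySplit_ne_nil s)
  · rw [expand_eq hs]
    rw [hs] at h
    simp at h
    rw [if_pos h]

theorem b_inner_eq (ps : List String) (out : List String) (pre : String) :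
    (ps.foldl (fun (st : List String × String) part =>
        (st.1 ++ [st.2 ++ "|" ++ part], st.2 ++ part)) (out, pre)).1
      = out ++ chain pre ps := by
  induction ps generalizing out pre with
  | nil => simp [chain]
  | cons p ps ih => simp [chain, ih]

theorem remove?_middle {α : Type} [BEq α] [LawfulBEq α] (pre suf : List α) (v : α)
    (h : v ∉ pre) : PySem.List.remove? (pre ++ v :: suf) v = some (pre ++ suf) := by
  induction pre with
  | nil => simp
  | cons x pre ih =>
    simp at h
    rw [List.cons_append, PySem.List.remove?_cons_of_ne _ (Ne.symm h.1), ih h.2]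
    rfl

theorem index?_middle {α : Type} [BEq α] [LawfulBEq α] (pre suf : List α) (v : α)
    (h : v ∉ pre) : PySem.List.index? (pre ++ v :: suf) v = some pre.length := by
  rw [PySem.List.index?_eq_some_iff]
  exact ⟨pre, suf, rfl, rfl, h⟩

theorem nodes_step (a b : String) (t : List String) :
    ((PySem.List.remove? (a :: b :: t) b).getD (a :: b :: t)) = a :: t := by
  by_cases hab : a = b
  · subst hab
    simp
  · rw [PySem.List.remove?_cons_of_ne _ hab, PySem.List.remove?_cons_self]
    rfl

theorem aInner_step (sent : String) (pre ins suf : List String) (j : Nat)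
    (hpre : sent ∉ pre) (hlen : ins.length = j)
    (c t : String) (ts : List String) :
    aInner sent (pre ++ sent :: (ins ++ suf), c :: t :: ts) (j : Int)
      = (pre ++ sent :: (ins ++ (c ++ "|" ++ t) :: suf), (c ++ t) :: ts) := by
  have h0 : (PySem.List.pyGet? (c :: t :: ts) 0).getD "" = c := by
    simp [PySem.List.pyGet?, PySem.List.pyIdx?, show (0:Int) ≤ (ts.length:Int) + 1 from by omega]
  have h1 : (PySem.List.pyGet? (c :: t :: ts) 1).getD "" = t := by
    simp [PySem.List.pyGet?, PySem.List.pyIdx?]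
  have h0' : (PySem.List.pyGet? (c :: ts) 0).getD "" = c := by
    simp [PySem.List.pyGet?, PySem.List.pyIdx?, show (0:Int) ≤ (ts.length:Int) from by omega]
  have hidx : PySem.List.index? (pre ++ sent :: (ins ++ suf)) sent = some pre.length :=
    index?_middle _ _ _ hpre
  have hns : (PySem.List.remove? (c :: t :: ts) t).getD (c :: t :: ts) = c :: ts :=
    nodes_step c t ts
  have hinsrt : PySem.List.insert (pre ++ sent :: (ins ++ suf))
      ((pre.length : Int) + 1 + (j : Int)) (c ++ "|" ++ t)
      = pre ++ sent :: (ins ++ (c ++ "|" ++ t) :: suf) := by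
    have hcast : ((pre.length : Int) + 1 + (j : Int)) = ((pre.length + 1 + j : Nat) : Int) := by
      push_cast; ring
    have hlen2 : (pre ++ sent :: ins).length = pre.length + 1 + j := by
      simp only [List.length_append, List.length_cons, hlen]; omega
    have hlen3 : pre.length + 1 + j ≤ (pre ++ sent :: (ins ++ suf)).length := by
      simp only [List.length_append, List.length_cons, hlen]; omega
    rw [hcast, PySem.List.insert_natCast _ _ _ hlen3]
    have htake : (pre ++ sent :: (ins ++ suf)).take (pre.length + 1 + j)
        = pre ++ sent :: ins := by
      rw [show pre ++ sent :: (ins ++ suf) = (pre ++ sent :: ins) ++ suf by simp]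
      rw [List.take_append_of_le_length (le_of_eq hlen2.symm)]
      exact List.take_of_length_le (le_of_eq hlen2)
    have hdrop : (pre ++ sent :: (ins ++ suf)).drop (pre.length + 1 + j) = suf := by
      rw [show pre ++ sent :: (ins ++ suf) = (pre ++ sent :: ins) ++ suf by simp]
      rw [List.drop_append_of_le_length (le_of_eq hlen2.symm)]
      simp [List.drop_of_length_le (le_of_eq hlen2)]
    rw [htake, hdrop]
    simp
  unfold aInner
  simp only [h0, h1, h0', hidx, Option.getD_some, hns, PySem.List.remove?_cons_self,
    PySem.List.insert_zero, hinsrt]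

theorem pySplit_len_ne {a b : String} (h : (pySplit a).length ≠ (pySplit b).length) : a ≠ b := by
  intro hh; exact h (by rw [hh])

theorem a_inner_eq (sent : String) (hsent : 3 ≤ (pySplit sent).length) (ts : List String) :
    ∀ (c : String) (ins pre suf : List String) (j : Nat),
    sent ∉ pre → sent ∉ ins → ins.length = j →
    barFree c → (∀ t ∈ ts, barFree t) →
    (PySem.List.pyRange (j : Int) ((j + ts.length : Nat) : Int) 1).foldl (aInner sent)
        (pre ++ sent :: (ins ++ suf), c :: ts)
      = (pre ++ sent :: (ins ++ chain c ts ++ suf), [ts.foldl (· ++ ·) c]) := by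
  induction ts with
  | nil =>
    intro c ins pre suf j hpre hins hlen hc hts
    have h0 : PySem.List.pyRange (j : Int) ((j + 0 : Nat) : Int) 1 = [] := by
      simp [PySem.List.pyRange]
    simp only [List.length_nil]
    rw [h0]
    simp [chain]
  | cons t ts ih =>
    intro c ins pre suf j hpre hins hlen hc hts
    have hrange : PySem.List.pyRange (j : Int) ((j + (t :: ts).length : Nat) : Int) 1
        = (j : Int) :: PySem.List.pyRange ((j + 1 : Nat) : Int) (((j + 1) + ts.length : Nat) : Int) 1 := by
      have e1 : ((j:Int) + 1) = ((j + 1 : Nat) : Int) := by omega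
      have e2 : ((j + (t :: ts).length : Nat) : Int) = (((j + 1) + ts.length : Nat) : Int) := by
        simp only [List.length_cons]; push_cast; ring
      rw [PySem.List.pyRange_one_cons (by push_cast; omega), e1, e2]
    rw [hrange]
    simp only [List.foldl_cons]
    rw [aInner_step sent pre ins suf j hpre hlen c t ts]
    have hnotin : sent ∉ ins ++ [c ++ "|" ++ t] := by
      simp
      refine ⟨hins, ?_⟩
      apply pySplit_len_ne
      rw [pySplit_binary c t hc (hts t (by simp))]
      simp only [List.length_cons, List.length_nil]
      omega
    have hshape : pre ++ sent :: (ins ++ (c ++ "|" ++ t) :: suf)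
        = pre ++ sent :: ((ins ++ [c ++ "|" ++ t]) ++ suf) := by simp
    rw [hshape]
    rw [ih (c ++ t) (ins ++ [c ++ "|" ++ t]) pre suf (j + 1) hpre hnotin
      (by simp [hlen]) (barFree_append _ _ hc (hts t (by simp)))
      (fun q hq => hts q (by simp [hq]))]
    simp [chain]

theorem flatMap_expand_of_small (l : List String)
    (h : ∀ e ∈ l, (pySplit e).length < 3) : l.flatMap expand = l := by
  induction l with
  | nil => rfl
  | cons e l ih =>
    rw [List.flatMap_cons, expand_of_small e (h e (by simp)), ih (fun q hq => h q (by simp [hq]))]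
    rfl

theorem aLoop_eq (fuel : Nat) (pre suf : List String)
    (hpre : ∀ x ∈ pre, (pySplit x).length < 3)
    (hfuel : (suf.flatMap expand).length ≤ fuel) :
    aLoop fuel (pre ++ suf) pre.length = pre ++ suf.flatMap expand := by
  induction fuel generalizing pre suf with
  | zero =>
    have hnil : suf = [] := by
      cases suf with
      | nil => rfl
      | cons s suf' =>
        exfalso
        rw [List.flatMap_cons, List.length_append, Nat.le_zero] at hfuel
        exact expand_ne_nil s (List.length_eq_zero_iff.mp (by omega))
    subst hnil
    simp [aLoop]
  | succ fuel ih =>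
    cases suf with
    | nil =>
      rw [aLoop]
      simp
    | cons sent suf' =>
      have hget : (pre ++ sent :: suf')[pre.length]'(by simp) = sent := by
        rw [List.getElem_append_right (by omega)]
        simp
      rw [aLoop, dif_pos (by simp)]
      simp only [hget]
      by_cases hq : 3 ≤ (pySplit sent).length
      · rw [if_pos hq]
        -- qualifying sentence: inner loop inserts the chain, then sent is removed
        rcases hs : pySplit sent with _ | ⟨c, ts⟩
        · exact absurd hs (pySplit_ne_nil sent)
        have hsentpre : sent ∉ pre := fun hmem => by
          have := hpre sent hmem; omega
        have hts3 : 3 ≤ ts.length + 1 := by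
          rw [hs] at hq; simpa using hq
        have hfold := a_inner_eq sent hq ts c [] pre suf' 0 hsentpre (by simp) rfl
          (pySplit_mem_barFree sent c (by rw [hs]; simp))
          (fun q hq' => pySplit_mem_barFree sent q (by rw [hs]; simp [hq']))
        simp only [List.nil_append, Nat.cast_zero, Nat.zero_add] at hfold
        rw [show (((c :: ts).length : Nat) : Int) - 1 = ((ts.length : Nat) : Int) by simp]
        rw [hfold]
        rw [remove?_middle pre (chain c ts ++ suf') sent hsentpre, Option.getD_some]
        -- peel the first chain element into pre
        rcases hts : ts with _ | ⟨t0, ts0⟩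
        · rw [hts] at hts3; simp at hts3
        subst hts
        rw [show chain c (t0 :: ts0) = (c ++ "|" ++ t0) :: chain (c ++ t0) ts0 from rfl]
        have hexp : expand sent = (c ++ "|" ++ t0) :: chain (c ++ t0) ts0 := by
          rw [expand_eq hs, if_neg (by simp only [List.length_cons] at hts3 ⊢; omega)]
          rfl
        have hch2 : ∀ e ∈ (c ++ "|" ++ t0) :: chain (c ++ t0) ts0, (pySplit e).length = 2 := by
          have := chain_mem_parts c (t0 :: ts0)
            (pySplit_mem_barFree sent c (by rw [hs]; simp))
            (fun q hq' => pySplit_mem_barFree sent q (by rw [hs]; simp [hq']))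
          rw [show chain c (t0 :: ts0) = (c ++ "|" ++ t0) :: chain (c ++ t0) ts0 from rfl] at this
          exact this
        have hpre' : ∀ x ∈ pre ++ [c ++ "|" ++ t0], (pySplit x).length < 3 := by
          intro x hx
          rcases List.mem_append.mp hx with hx | hx
          · exact hpre x hx
          · rw [hch2 x (by simp at hx; simp [hx])]; omega
        have hsmall : (chain (c ++ t0) ts0).flatMap expand = chain (c ++ t0) ts0 :=
          flatMap_expand_of_small _ (fun e he => by rw [hch2 e (by simp [he])]; omega)
        have hflen : (((chain (c ++ t0) ts0) ++ suf').flatMap expand).length ≤ fuel := by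
          rw [List.flatMap_append, hsmall, List.length_append, chain_length]
          rw [List.flatMap_cons, List.length_append, hexp] at hfuel
          simp only [List.length_cons, chain_length] at hfuel
          omega
        have := ih (pre ++ [c ++ "|" ++ t0]) (chain (c ++ t0) ts0 ++ suf') hpre' hflen
        rw [List.length_append] at this
        simp only [List.length_cons, List.length_nil, Nat.zero_add, List.append_assoc, List.cons_append, List.nil_append] at this ⊢
        rw [this]
        rw [List.flatMap_cons, hexp, List.flatMap_append, hsmall]
        simp
      · rw [if_neg hq]
        have := ih (pre ++ [sent]) suf'
          (by intro x hx
              rcases List.mem_append.mp hx with hx | hx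
              · exact hpre x hx
              · simp at hx; subst hx; omega)
          (by rw [List.flatMap_cons, expand_of_small sent (by omega)] at hfuel
              simp only [List.singleton_append, List.length_cons] at hfuel
              omega)
        rw [List.length_append] at this
        simp only [List.length_cons, List.length_nil, Nat.zero_add, List.append_assoc, List.cons_append, List.nil_append] at this
        rw [this]
        rw [List.flatMap_cons, expand_of_small sent (by omega)]
        simp

theorem alt_foldl_eq (l : List String) : ∀ out : List String,
    l.foldl
      (fun out sent =>
        let parts := pySplit sent
        if parts.length < 3 then out ++ [sent]
        else
          ((PySem.List.slice parts (some 1)).foldl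
            (fun (st : List String × String) part =>
              (st.1 ++ [st.2 ++ "|" ++ part], st.2 ++ part))
            (out, parts.headD "")).1)
      out
    = out ++ l.flatMap expand := by
  induction l with
  | nil => intro out; simp
  | cons sent l ih =>
    intro out
    rw [List.foldl_cons, ih]
    rcases hs : pySplit sent with _ | ⟨c, ts⟩
    · exact absurd hs (pySplit_ne_nil sent)
    by_cases hsm : (pySplit sent).length < 3
    · simp only [hs] at hsm ⊢
      rw [if_pos hsm]
      rw [List.flatMap_cons, expand_of_small sent (by rw [hs]; exact hsm)]
      simp
    · simp only [hs] at hsm ⊢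
      rw [if_neg hsm]
      have hslice : PySem.List.slice (c :: ts) (some 1) = ts := by
        rw [PySem.List.slice_from _ (by omega)]
        simp
      rw [hslice]
      simp only [List.headD_cons]
      rw [b_inner_eq ts out c]
      rw [List.flatMap_cons]
      rw [expand_eq hs, if_neg (by simp only [List.length_cons] at hsm; omega)]
      simp

theorem alt_eq_flatMap (p : Int) (sList : List String) :
    genBinaryAction_alt p sList = sList.flatMap expand := by
  unfold genBinaryAction_alt
  rw [alt_foldl_eq]
  simp

theorem flatMap_expand_length (sList : List String) :
    (sList.flatMap expand).length ≤ (sList.map (fun s => s.toList.length + 1)).sum := by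
  induction sList with
  | nil => simp
  | cons s l ih =>
    rw [List.flatMap_cons, List.length_append, List.map_cons, List.sum_cons]
    have := expand_length_le s
    omega


-- ===== VERDICT (by name: the statement is the Claim_ definition above) =====
theorem genBinaryAction_spec : Claim_equal_genBinaryAction := by
  intro p sList _
  unfold Spec_genBinaryAction
  rw [alt_eq_flatMap]
  have := aLoop_eq ((sList.map (fun s => s.toList.length + 1)).sum) [] sList
    (by simp) (by simpa using flatMap_expand_length sList)
  simpa [genBinaryAction] using this
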